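-- pv_equiv track=rewrite | github.com/desh2608/tweet-irony-detection | emoji_process.py | makeEmojiList
-- ===== SOURCE A (Python) =====
-- def makeEmojiList(emojis):
--     ef = {}
--     for sent in emojis:
--         for e in sent:
--             if e in ef:
--                 ef[e] += 1
--             else:
--                 ef[e] = 0
--     el = {}
--     i = 0
--     for e,f in ef.items():
--         el[e] = i
--         i += 1
--     el['UNK'] = i
--     return el
-- ===== SOURCE B (Python) =====
-- def makeEmojiList(emojis):
--     el = {}
--     for sent in emojis:
--         for e in sent:
--             if e not in el:
--                 el[e] = len(el)
--     el['UNK'] = len(el)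
--     return el
-- ===== Notes on version B (the rewrite author's own statement) =====
-- stated objective: simpler
-- what changed: B builds the emoji-to-index dict in a single pass, assigning len(el) at each first occurrence, instead of A's two passes (an unused frequency counter followed by a re-enumeration of its keys).
import Mathlib
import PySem

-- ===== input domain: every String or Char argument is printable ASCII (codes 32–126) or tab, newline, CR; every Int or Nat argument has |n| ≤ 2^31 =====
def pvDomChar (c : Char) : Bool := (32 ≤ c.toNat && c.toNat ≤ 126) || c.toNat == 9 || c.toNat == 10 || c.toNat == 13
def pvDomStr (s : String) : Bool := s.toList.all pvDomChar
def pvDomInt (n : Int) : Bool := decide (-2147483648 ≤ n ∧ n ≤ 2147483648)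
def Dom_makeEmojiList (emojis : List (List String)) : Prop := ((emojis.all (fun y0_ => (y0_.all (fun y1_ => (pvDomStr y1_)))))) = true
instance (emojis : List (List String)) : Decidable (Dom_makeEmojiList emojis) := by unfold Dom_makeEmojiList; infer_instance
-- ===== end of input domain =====

-- B replaces A's two passes (unused frequency counter, then re-enumeration of its keys) by one
-- pass that assigns len(el) at each first occurrence; objective: simpler.

-- ===== PORT A =====
def makeEmojiList (emojis : List (List String)) : List (String × Int) :=
  let ef : PySem.Dict String Int :=
    emojis.foldl (fun ef sent =>
      sent.foldl (fun ef e =>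
        if ef.contains e then ef.modify e 0 (· + 1) else ef.insert e 0) ef)
      PySem.Dict.empty
  let p : PySem.Dict String Int × Int :=
    ef.items.foldl (fun p ev => (p.1.insert ev.1 p.2, p.2 + 1)) (PySem.Dict.empty, 0)
  (p.1.insert "UNK" p.2).items

-- ===== PORT B =====
def makeEmojiList_alt (emojis : List (List String)) : List (String × Int) :=
  let el : PySem.Dict String Int :=
    emojis.foldl (fun el sent =>
      sent.foldl (fun el e =>
        if el.contains e then el else el.insert e (el.size : Int)) el)
      PySem.Dict.empty
  (el.insert "UNK" (el.size : Int)).items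

-- ===== PRECONDITION & SPEC =====
def Spec_makeEmojiList (emojis : List (List String)) (out : List (String × Int)) : Prop := out = makeEmojiList_alt emojis
instance (emojis : List (List String)) (out : List (String × Int)) : Decidable (Spec_makeEmojiList emojis out) := by unfold Spec_makeEmojiList; infer_instance

-- ===== CLAIM (what is proved, stated in full; the proofs are below) =====
def Claim_equal_makeEmojiList : Prop := ∀ (emojis : List (List String)), Dom_makeEmojiList emojis → Spec_makeEmojiList emojis (makeEmojiList emojis)

-- ===== LEMMAS AND PROOFS =====

theorem pv_enumerate_append_singleton (l : List String) (x : String) (s : Int) :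
    PySem.List.enumerate (l ++ [x]) s
      = PySem.List.enumerate l s ++ [(s + (l.length : Int), x)] := by
  induction l generalizing s with
  | nil => simp [PySem.List.enumerate_nil, PySem.List.enumerate_cons]
  | cons a t ih =>
      have harith : s + 1 + (t.length : Int) = s + ((a :: t).length : Int) := by
        simp only [List.length_cons]; push_cast; ring
      simp only [List.cons_append, PySem.List.enumerate_cons, ih, harith]

-- the joint invariant of A's counting loop and B's index-assigning loop
theorem pv_loop_inv (xs : List String) (ef el : PySem.Dict String Int)
    (h : el.items = (PySem.List.enumerate ef.keys 0).map (fun p => (p.2, p.1)))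
    (hnd : ef.keys.Nodup) :
    (xs.foldl (fun d e => if d.contains e then d.modify e 0 (· + 1) else d.insert e 0) ef).keys.Nodup
    ∧ (xs.foldl (fun d e => if d.contains e then d else d.insert e (d.size : Int)) el).items
      = (PySem.List.enumerate
          (xs.foldl (fun d e => if d.contains e then d.modify e 0 (· + 1) else d.insert e 0) ef).keys 0).map
          (fun p => (p.2, p.1)) := by
  induction xs generalizing ef el with
  | nil => exact ⟨hnd, h⟩
  | cons e t ih =>
      have hkeys : el.keys = ef.keys := by
        simp only [PySem.Dict.keys] at h ⊢
        simp [h, Function.comp_def, PySem.List.map_snd_enumerate]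
      have hcont : el.contains e = ef.contains e := by
        simp [PySem.Dict.contains_eq_decide_mem_keys, hkeys]
      simp only [List.foldl_cons]
      by_cases hc : ef.contains e = true
      · have hkm : (ef.modify e 0 (· + 1)).keys = ef.keys := by
          rw [PySem.Dict.keys_modify, PySem.Dict.keys_insert_of_contains _ _ hc]
        rw [hc, hcont, hc]
        simp only [if_true]
        exact ih _ _ (by rw [hkm]; exact h) (by rw [hkm]; exact hnd)
      · rw [Bool.not_eq_true] at hc
        rw [hc, hcont, hc]
        simp only [Bool.false_eq_true, if_false]
        have hnotmem : e ∉ ef.keys := by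
          simpa [PySem.Dict.contains_eq_decide_mem_keys] using hc
        have hsz : (el.size : Int) = (ef.keys.length : Int) := by
          simp [PySem.Dict.size, h, PySem.List.length_enumerate]
        refine ih _ _ ?_ ?_
        · rw [PySem.Dict.items_insert_of_not_contains _ _ (hcont.trans hc),
              PySem.Dict.keys_insert_of_not_contains _ _ hc,
              pv_enumerate_append_singleton]
          simp [h, hsz]
        · rw [PySem.Dict.keys_insert_of_not_contains _ _ hc]
          simpa [List.nodup_append] using ⟨hnd, fun a ha he => hnotmem (he ▸ ha)⟩

-- A's second loop: enumerating the items of a dict with fresh, distinct keys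
theorem pv_pairfold (ps : List (String × Int)) (d : PySem.Dict String Int) (i : Int)
    (hfresh : ∀ p ∈ ps, d.contains p.1 = false) (hnd : (ps.map (·.1)).Nodup) :
    (ps.foldl (fun q ev => (q.1.insert ev.1 q.2, q.2 + 1)) (d, i)).1.items
      = d.items ++ (PySem.List.enumerate (ps.map (·.1)) i).map (fun p => (p.2, p.1))
    ∧ (ps.foldl (fun q ev => (q.1.insert ev.1 q.2, q.2 + 1)) (d, i)).2 = i + (ps.length : Int) := by
  induction ps generalizing d i with
  | nil => simp [PySem.List.enumerate_nil]
  | cons kv t ih =>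
      simp only [List.map_cons, List.nodup_cons] at hnd
      have hk : d.contains kv.1 = false := hfresh kv (by simp)
      have hfresh' : ∀ p ∈ t, (d.insert kv.1 i).contains p.1 = false := by
        intro p hp
        rw [PySem.Dict.contains_insert]
        have h1 : (p.1 == kv.1) = false := by
          simp only [beq_eq_false_iff_ne, ne_eq]
          intro hcon
          exact hnd.1 (hcon ▸ List.mem_map_of_mem hp)
        simp [h1, hfresh p (List.mem_cons_of_mem _ hp)]
      obtain ⟨h1, h2⟩ := ih (d.insert kv.1 i) (i + 1) hfresh' hnd.2
      simp only [List.foldl_cons]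
      constructor
      · rw [h1, PySem.Dict.items_insert_of_not_contains _ _ hk]
        simp [PySem.List.enumerate_cons]
      · rw [h2]
        simp only [List.length_cons]
        push_cast
        ring

-- ===== VERDICT (by name: the statement is the Claim_ definition above) =====
theorem makeEmojiList_spec : Claim_equal_makeEmojiList := by
  intro emojis _
  unfold Spec_makeEmojiList makeEmojiList makeEmojiList_alt
  simp only [← List.foldl_flatten]
  obtain ⟨hnd, hrel⟩ := pv_loop_inv emojis.flatten PySem.Dict.empty PySem.Dict.empty
    (by simp [PySem.Dict.keys_empty, PySem.List.enumerate_nil]; rfl) (by simp [PySem.Dict.keys_empty])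
  set EF : PySem.Dict String Int := emojis.flatten.foldl
    (fun d e => if d.contains e then d.modify e 0 (· + 1) else d.insert e (0 : Int)) PySem.Dict.empty with hEF
  set EL : PySem.Dict String Int := emojis.flatten.foldl
    (fun d e => if d.contains e then d else d.insert e (d.size : Int)) PySem.Dict.empty with hEL
  have hndi : (EF.items.map (·.1)).Nodup := hnd
  obtain ⟨hp1, hp2⟩ := pv_pairfold EF.items PySem.Dict.empty 0
    (fun p _ => by simp [PySem.Dict.contains_empty]) hndi
  have hitems : (EF.items.foldl (fun q ev => (q.1.insert ev.1 q.2, q.2 + 1))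
      (PySem.Dict.empty, (0 : Int))).1 = EL := by
    apply PySem.Dict.ext
    rw [hp1, hrel]
    have hemp : (PySem.Dict.empty : PySem.Dict String Int).items = [] := rfl
    simp [hemp, PySem.Dict.keys]
  have hsz : (EF.items.foldl (fun q ev => (q.1.insert ev.1 q.2, q.2 + 1))
      (PySem.Dict.empty, (0 : Int))).2 = (EL.size : Int) := by
    rw [hp2]
    simp [PySem.Dict.size, hrel, PySem.List.length_enumerate, PySem.Dict.keys]
  rw [hitems, hsz]
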